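-- pv_equiv track=rewrite | github.com/NoureldinYosri/Graduation-Project | GUI/ball_detector.py | get_mask
-- ===== SOURCE A (Python) =====
-- def get_mask(I):
-- 	"""takes a 2d msk array of 0s and 1s"""
-- 	if len(I) == 0 or len(I[0]) == 0: return 0;
-- 	n = len(I);
-- 	m = len(I[0]);
-- 	# for row in I:
-- 	# 	if len(row) != m:
-- 	# 		print "uneven dimensions ... aborting";
-- 	# 		return;
-- 	row_sum = [0 for i in range(n)];
-- 	col_sum = [0 for i in range(m)];
-- 	row_sum2 = [0 for i in range(n)];
-- 	col_sum2 = [0 for i in range(m)];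
-- 	msk = [[0 for j in range(m)] for i in range(n)];
-- 	for i in range(n):
-- 		for j in range(m):
-- 			col_sum[j] += I[i][j];
-- 			row_sum[i] += I[i][j];
-- 	for i in range(n):
-- 		for j in range(m):
-- 			if I[i][j]:
-- 				msk[i][j] = 1;
-- 				row_sum2[i] += 1;
-- 				col_sum2[j] += 1;
-- 			else:
-- 				msk[i][j] = (col_sum2[j] > 10) \
-- 							 and (col_sum[j] - col_sum2[j] > 10) \
-- 							and (row_sum2[i] > 10) \
-- 							and (row_sum[i] - row_sum2[i] > 10);
-- 				msk[i][j] = int(msk[i][j]);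
-- 	return msk;
-- ===== SOURCE B (Python) =====
-- def get_mask(I):
--     """takes a 2d msk array of 0s and 1s"""
--     # B: precompute value totals and truthy-count prefix tables once, then fill
--     # the mask with a pure per-cell formula (no running counters, no mutation).
--     if len(I) == 0 or len(I[0]) == 0:
--         return 0
--     n, m = len(I), len(I[0])
--     row_tot = [sum(I[i][j] for j in range(m)) for i in range(n)]
--     col_tot = [sum(I[i][j] for i in range(n)) for j in range(m)]
--
--     def prefix_ones(cells):
--         # p[k] = number of truthy values among the first k cells
--         p = [0]
--         for x in cells:
--             p.append(p[-1] + (1 if x else 0))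
--         return p
--
--     left = [prefix_ones(I[i][j] for j in range(m)) for i in range(n)]
--     up = [prefix_ones(I[i][j] for i in range(n)) for j in range(m)]
--     return [[1 if I[i][j] else int(up[j][i] > 10 and col_tot[j] - up[j][i] > 10
--                                    and left[i][j] > 10 and row_tot[i] - left[i][j] > 10)
--              for j in range(m)]
--             for i in range(n)]
-- ===== Notes on version B (the rewrite author's own statement) =====
-- stated objective: alternative
-- what changed: B replaces A's two in-place passes that mutate running row/column counters and a pre-allocated mask with precomputed value totals plus truthy-count prefix tables and a pure per-cell comprehension that builds the mask directly.
-- outside the precondition, e.g. on get_mask([]): A returns 0, B returns 0; on get_mask([[]]): A returns 0, B returns 0; on get_mask([[1, 2], [3]]): A raises IndexError, B raises IndexError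
import Mathlib
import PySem

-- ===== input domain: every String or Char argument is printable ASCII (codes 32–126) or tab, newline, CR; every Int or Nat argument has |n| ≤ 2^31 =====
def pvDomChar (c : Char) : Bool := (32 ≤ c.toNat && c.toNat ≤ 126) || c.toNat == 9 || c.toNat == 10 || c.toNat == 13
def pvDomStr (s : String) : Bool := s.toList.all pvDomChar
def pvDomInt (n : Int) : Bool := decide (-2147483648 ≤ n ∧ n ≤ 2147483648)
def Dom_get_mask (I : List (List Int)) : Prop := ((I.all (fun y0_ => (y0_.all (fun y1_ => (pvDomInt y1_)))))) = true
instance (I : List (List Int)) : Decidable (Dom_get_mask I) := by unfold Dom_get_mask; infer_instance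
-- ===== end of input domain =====

-- B builds the mask with precomputed totals and truthy-count prefix tables and a pure
-- per-cell formula, instead of A's two in-place passes over mutable running counters.

-- ===== PORT A =====
-- mirrors Python's I[i][j]; exact whenever both indices are in range, which Pre_get_mask guarantees
def pvCell (I : List (List Int)) (i j : Nat) : Int := (I.getD i []).getD j 0

-- body of A's first loop: col_sum[j] += I[i][j]; row_sum[i] += I[i][j]  (state = (row_sum, col_sum))
def pvStep1 (I : List (List Int)) (i : Nat) (st : List Int × List Int) (j : Nat) :
    List Int × List Int :=
  (st.1.modify i (· + pvCell I i j), st.2.modify j (· + pvCell I i j))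

-- body of A's second loop (state = (row_sum2, col_sum2, msk))
def pvStep2 (I : List (List Int)) (rs cs : List Int) (i : Nat)
    (st : List Int × List Int × List (List Int)) (j : Nat) :
    List Int × List Int × List (List Int) :=
  if pvCell I i j ≠ 0 then
    (st.1.modify i (· + 1), st.2.1.modify j (· + 1),
     st.2.2.modify i (fun row => row.set j 1))
  else
    (st.1, st.2.1,
     st.2.2.modify i (fun row => row.set j
       (if st.2.1.getD j 0 > 10 ∧ cs.getD j 0 - st.2.1.getD j 0 > 10 ∧
           st.1.getD i 0 > 10 ∧ rs.getD i 0 - st.1.getD i 0 > 10 then 1 else 0)))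

def get_mask (I : List (List Int)) : Option (List (List Int)) :=
  -- Python returns the int 0 here (not a list); the port returns none, Pre_ excludes it
  if I.length = 0 ∨ (I.headD []).length = 0 then none
  else
    let n := I.length
    let m := (I.headD []).length
    let sums := (List.range n).foldl (fun st i => (List.range m).foldl (pvStep1 I i) st)
      (List.replicate n 0, List.replicate m 0)
    let res := (List.range n).foldl (fun st i => (List.range m).foldl (pvStep2 I sums.1 sums.2 i) st)
      (List.replicate n 0, List.replicate m 0, List.replicate n (List.replicate m 0))
    some res.2.2

-- ===== PORT B =====
-- Source B's prefix_ones: p[k] = number of truthy values among the first k cells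
def pvPrefixOnes (cells : List Int) : List Int :=
  cells.foldl (fun p x => p ++ [p.getLastD 0 + (if x ≠ 0 then 1 else 0)]) [0]

def get_mask_alt (I : List (List Int)) : Option (List (List Int)) :=
  if I.length = 0 ∨ (I.headD []).length = 0 then none
  else
    let n := I.length
    let m := (I.headD []).length
    let rowTot := (List.range n).map (fun i => ((List.range m).map (fun j => pvCell I i j)).sum)
    let colTot := (List.range m).map (fun j => ((List.range n).map (fun i => pvCell I i j)).sum)
    let left := (List.range n).map (fun i => pvPrefixOnes ((List.range m).map (fun j => pvCell I i j)))
    let up := (List.range m).map (fun j => pvPrefixOnes ((List.range n).map (fun i => pvCell I i j)))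
    some ((List.range n).map (fun i => (List.range m).map (fun j =>
      if pvCell I i j ≠ 0 then (1 : Int)
      else if (up.getD j []).getD i 0 > 10 ∧ colTot.getD j 0 - (up.getD j []).getD i 0 > 10 ∧
              (left.getD i []).getD j 0 > 10 ∧ rowTot.getD i 0 - (left.getD i []).getD j 0 > 10
           then 1 else 0)))

-- ===== PRECONDITION & SPEC =====
-- Pre_ excludes empty grids (A returns the int 0, not a list of lists) and grids with a row
-- shorter than the first row (A raises IndexError); rows longer than the first are admitted.
def Pre_get_mask (I : List (List Int)) : Prop :=
  I ≠ [] ∧ (I.headD []) ≠ [] ∧ ∀ row ∈ I, (I.headD []).length ≤ row.length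
instance (I : List (List Int)) : Decidable (Pre_get_mask I) := by unfold Pre_get_mask; infer_instance

def pvWitness_get_mask : List (List Int) := [[1, 0], [0, 1]]

def Spec_get_mask (I : List (List Int)) (out : Option (List (List Int))) : Prop := out = get_mask_alt I
instance (I : List (List Int)) (out : Option (List (List Int))) : Decidable (Spec_get_mask I out) := by unfold Spec_get_mask; infer_instance

-- ===== CLAIM (what is proved, stated in full; the proofs are below) =====
def Claim_equal_get_mask : Prop := ∀ (I : List (List Int)), Dom_get_mask I → Pre_get_mask I → Spec_get_mask I (get_mask I)

-- ===== LEMMAS AND PROOFS =====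

-- closed-form quantities both ports are reduced to
def pvOnes (xs : List Int) : Int := (xs.map (fun x => if x ≠ 0 then (1 : Int) else 0)).sum
def pvRowTot (I : List (List Int)) (m i : Nat) : Int := ((List.range m).map (fun j => pvCell I i j)).sum
def pvColTot (I : List (List Int)) (n j : Nat) : Int := ((List.range n).map (fun i => pvCell I i j)).sum
def pvLeft (I : List (List Int)) (i k : Nat) : Int := pvOnes ((List.range k).map (fun j => pvCell I i j))
def pvUp (I : List (List Int)) (j k : Nat) : Int := pvOnes ((List.range k).map (fun i => pvCell I i j))
def pvMaskCell (I : List (List Int)) (n m i j : Nat) : Int :=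
  if pvCell I i j ≠ 0 then 1
  else if pvUp I j i > 10 ∧ pvColTot I n j - pvUp I j i > 10 ∧
          pvLeft I i j > 10 ∧ pvRowTot I m i - pvLeft I i j > 10 then 1 else 0
def pvCanon (I : List (List Int)) : Option (List (List Int)) :=
  some ((List.range I.length).map (fun i => (List.range (I.headD []).length).map
    (fun j => pvMaskCell I I.length (I.headD []).length i j)))

-- getD facts
theorem pv_getD_replicate {α : Type} (n r : Nat) (a d : α) :
    (List.replicate n a).getD r d = if r < n then a else d := by
  rw [List.getD_eq_getElem?_getD, List.getElem?_replicate]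
  split <;> rfl

theorem pv_getD_modify {α : Type} (l : List α) (i j : Nat) (f : α → α) (d : α) :
    (l.modify i f).getD j d = if i = j ∧ j < l.length then f (l.getD j d) else l.getD j d := by
  rw [List.getD_eq_getElem?_getD, List.getElem?_modify]
  cases hj : l[j]? with
  | none =>
    have hlen : ¬ j < l.length := by
      intro hc
      rw [List.getElem?_eq_getElem hc] at hj
      simp at hj
    simp [hlen, List.getD_eq_getElem?_getD]
  | some a =>
    have hlen : j < l.length := by
      by_contra hc
      rw [List.getElem?_eq_none (Nat.le_of_not_lt hc)] at hj
      simp at hj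
    have hval : l.getD j d = a := by simp [List.getD_eq_getElem?_getD, hj]
    have hval' : l[j] = a := by
      have := List.getElem?_eq_getElem hlen
      rw [hj] at this
      exact (Option.some.injEq _ _).mp this.symm
    by_cases hij : i = j <;> simp [hij, hlen, hval']

theorem pv_getD_set {α : Type} (l : List α) (i j : Nat) (a d : α) :
    (l.set i a).getD j d = if i = j ∧ j < l.length then a else l.getD j d := by
  rw [List.getD_eq_getElem?_getD, List.getElem?_set]
  by_cases hij : i = j
  · subst hij
    by_cases hl : i < l.length
    · simp [hl]
    · simp [hl, List.getD_eq_getElem?_getD]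
  · simp [hij, List.getD_eq_getElem?_getD]

theorem pv_getD_map_range {α : Type} (q c : Nat) (f : Nat → α) (d : α) :
    ((List.range q).map f).getD c d = if c < q then f c else d := by
  by_cases h : c < q
  · simp [List.getD_eq_getElem?_getD, h]
  · simp [List.getD_eq_getElem?_getD, h]

theorem pvOnes_range_succ (f : Nat → Int) (k : Nat) :
    pvOnes ((List.range (k + 1)).map f) = pvOnes ((List.range k).map f) + (if f k ≠ 0 then 1 else 0) := by
  simp [pvOnes, List.range_succ]

theorem pvLeft_succ (I : List (List Int)) (i k : Nat) :
    pvLeft I i (k + 1) = pvLeft I i k + (if pvCell I i k ≠ 0 then 1 else 0) :=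
  pvOnes_range_succ _ _

theorem pvUp_succ (I : List (List Int)) (j k : Nat) :
    pvUp I j (k + 1) = pvUp I j k + (if pvCell I k j ≠ 0 then 1 else 0) :=
  pvOnes_range_succ _ _

-- ---- loop 1 of A ----
theorem pv_loop1_inner (I : List (List Int)) (i m' : Nat) :
    ∀ k ≤ m', ∀ st : List Int × List Int, st.2.length = m' →
      ((List.range k).foldl (pvStep1 I i) st).1.length = st.1.length ∧
      ((List.range k).foldl (pvStep1 I i) st).2.length = m' ∧
      (∀ a, ((List.range k).foldl (pvStep1 I i) st).1.getD a 0 =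
        st.1.getD a 0 + (if a = i ∧ i < st.1.length then ((List.range k).map (fun j => pvCell I i j)).sum else 0)) ∧
      (∀ c, ((List.range k).foldl (pvStep1 I i) st).2.getD c 0 =
        st.2.getD c 0 + (if c < k then pvCell I i c else 0)) := by
  intro k
  induction k with
  | zero =>
    intro _ st hst
    simp only [List.range_zero, List.foldl_nil]
    exact ⟨by trivial, hst, fun a => by simp, fun c => by simp⟩
  | succ k ih =>
    intro hk st hst
    obtain ⟨ih1, ih2, ih3, ih4⟩ := ih (Nat.le_of_succ_le hk) st hst
    rw [List.range_succ, List.foldl_append]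
    simp only [List.foldl_cons, List.foldl_nil, pvStep1]
    refine ⟨by rw [List.length_modify]; exact ih1, by rw [List.length_modify]; exact ih2, ?_, ?_⟩
    · intro a
      rw [pv_getD_modify, ih1, ih3 a]
      simp only [List.map_append, List.sum_append, List.map_cons, List.map_nil, List.sum_cons,
        List.sum_nil]
      split_ifs <;> omega
    · intro c
      rw [pv_getD_modify, ih2, ih4 c]
      have hkm : k < m' := hk
      by_cases hck : k = c
      · subst hck
        split_ifs <;> omega
      · split_ifs <;> omega

theorem pv_loop1_main (I : List (List Int)) (n m : Nat) :
    ∀ t ≤ n,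
      ((List.range t).foldl (fun st i => (List.range m).foldl (pvStep1 I i) st)
        (List.replicate n 0, List.replicate m 0)).1.length = n ∧
      ((List.range t).foldl (fun st i => (List.range m).foldl (pvStep1 I i) st)
        (List.replicate n 0, List.replicate m 0)).2.length = m ∧
      (∀ a, ((List.range t).foldl (fun st i => (List.range m).foldl (pvStep1 I i) st)
        (List.replicate n 0, List.replicate m 0)).1.getD a 0 = if a < t then pvRowTot I m a else 0) ∧
      (∀ c, ((List.range t).foldl (fun st i => (List.range m).foldl (pvStep1 I i) st)
        (List.replicate n 0, List.replicate m 0)).2.getD c 0 =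
          if c < m then ((List.range t).map (fun i => pvCell I i c)).sum else 0) := by
  intro t
  induction t with
  | zero =>
    intro _
    refine ⟨by simp, by simp, ?_, ?_⟩
    · intro a
      simp only [List.range_zero, List.foldl_nil]
      rw [pv_getD_replicate]
      simp
    · intro c
      simp only [List.range_zero, List.foldl_nil]
      rw [pv_getD_replicate]
      split_ifs <;> simp
  | succ t ih =>
    intro ht
    obtain ⟨ih1, ih2, ih3, ih4⟩ := ih (Nat.le_of_succ_le ht)
    rw [List.range_succ, List.foldl_append]
    simp only [List.foldl_cons, List.foldl_nil]
    obtain ⟨j1, j2, j3, j4⟩ := pv_loop1_inner I t m m le_rfl _ ih2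
    refine ⟨by rw [j1]; exact ih1, j2, ?_, ?_⟩
    · intro a
      rw [j3 a, ih3 a, ih1]
      have htn : t < n := ht
      have hRT : pvRowTot I m t = ((List.range m).map (fun j => pvCell I t j)).sum := rfl
      by_cases hat : a = t
      · subst hat
        split_ifs <;> omega
      · split_ifs <;> omega
    · intro c
      rw [j4 c, ih4 c]
      simp only [List.map_append, List.sum_append, List.map_cons, List.map_nil, List.sum_cons,
        List.sum_nil]
      split_ifs <;> omega

-- beta-reduced corollaries of pv_getD_modify for the two shapes A's loops use
theorem pv_getD_modify_add (l : List Int) (i j : Nat) (x d : Int) :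
    (l.modify i (· + x)).getD j d = if i = j ∧ j < l.length then l.getD j d + x else l.getD j d := by
  rw [pv_getD_modify]

theorem pv_getD_modify_set (l : List (List Int)) (i j k : Nat) (b : Int) :
    (l.modify i (fun row => row.set k b)).getD j [] =
      if i = j ∧ j < l.length then (l.getD j []).set k b else l.getD j [] := by
  rw [pv_getD_modify]

-- ---- loop 2 of A ----
def pvInv (I : List (List Int)) (n m i k : Nat) (st : List Int × List Int × List (List Int)) : Prop :=
  st.1.length = n ∧ st.2.1.length = m ∧ st.2.2.length = n ∧
  (∀ r, (st.2.2.getD r []).length = if r < n then m else 0) ∧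
  (∀ r, st.1.getD r 0 = if r < i then pvLeft I r m else if r = i then pvLeft I i k else 0) ∧
  (∀ c, st.2.1.getD c 0 = if c < m then (if c < k then pvUp I c (i + 1) else pvUp I c i) else 0) ∧
  (∀ r c, (st.2.2.getD r []).getD c 0 =
    if (r < i ∨ (r = i ∧ c < k)) ∧ c < m then pvMaskCell I n m r c else 0)

theorem pv_loop2_inner (I : List (List Int)) (n m : Nat) (rs cs : List Int)
    (hrs : ∀ r, rs.getD r 0 = if r < n then pvRowTot I m r else 0)
    (hcs : ∀ c, cs.getD c 0 = if c < m then pvColTot I n c else 0)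
    (i : Nat) (hi : i < n) :
    ∀ k ≤ m, ∀ st, pvInv I n m i 0 st →
      pvInv I n m i k ((List.range k).foldl (pvStep2 I rs cs i) st) := by
  intro k
  induction k with
  | zero =>
    intro _ st h0
    simpa only [List.range_zero, List.foldl_nil] using h0
  | succ k ih =>
    intro hk st h0
    have hkm : k < m := hk
    obtain ⟨h1, h2, h3, h4, hR, hC, hM⟩ := ih (Nat.le_of_succ_le hk) st h0
    rw [List.range_succ, List.foldl_append]
    simp only [List.foldl_cons, List.foldl_nil]
    set st' := (List.range k).foldl (pvStep2 I rs cs i) st with hst'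
    by_cases hv : pvCell I i k ≠ 0
    · simp only [pvStep2, if_pos hv]
      refine ⟨by simpa [List.length_modify] using h1, by simpa [List.length_modify] using h2,
        by simpa [List.length_modify] using h3, ?_, ?_, ?_, ?_⟩
      · intro r
        rw [pv_getD_modify_set, h3]
        by_cases hir : i = r ∧ r < n
        · rw [if_pos hir, List.length_set]; exact h4 r
        · rw [if_neg hir]; exact h4 r
      · intro r
        rw [pv_getD_modify_add, h1, hR r, pvLeft_succ, if_pos hv]
        split_ifs <;> omega
      · intro c
        rw [pv_getD_modify_add, h2, hC c]
        by_cases hck : c = k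
        · subst hck
          have hcu := pvUp_succ I c i
          rw [if_pos hv] at hcu
          split_ifs <;> omega
        · split_ifs <;> omega
      · intro r c
        rw [pv_getD_modify_set, h3]
        by_cases hir : i = r ∧ r < n
        · obtain ⟨hirr, hrn⟩ := hir
          subst hirr
          rw [if_pos ⟨rfl, hrn⟩, pv_getD_set, h4 i, hM i c]
          have hmask : pvMaskCell I n m i k = 1 := by
            unfold pvMaskCell
            rw [if_pos hv]
          by_cases hck : k = c
          · subst hck
            split_ifs <;> omega
          · split_ifs <;> omega
        · rw [if_neg hir, hM r c]
          split_ifs <;> omega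
    · simp only [pvStep2, if_neg hv]
      have hv0 : pvCell I i k = 0 := by
        by_contra hc
        exact hv hc
      refine ⟨h1, h2, by simpa [List.length_modify] using h3, ?_, ?_, ?_, ?_⟩
      · intro r
        rw [pv_getD_modify_set, h3]
        by_cases hir : i = r ∧ r < n
        · rw [if_pos hir, List.length_set]; exact h4 r
        · rw [if_neg hir]; exact h4 r
      · intro r
        rw [hR r]
        have hls := pvLeft_succ I i k
        rw [if_neg hv] at hls
        split_ifs <;> omega
      · intro c
        rw [hC c]
        by_cases hck : c = k
        · subst hck
          have hcu := pvUp_succ I c i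
          rw [if_neg hv] at hcu
          split_ifs <;> omega
        · split_ifs <;> omega
      · intro r c
        rw [pv_getD_modify_set, h3]
        have e1 : st'.2.1.getD k 0 = pvUp I k i := by
          rw [hC k]
          simp [hkm]
        have e2 : cs.getD k 0 = pvColTot I n k := by
          rw [hcs k, if_pos hkm]
        have e3 : st'.1.getD i 0 = pvLeft I i k := by
          rw [hR i]
          simp
        have e4 : rs.getD i 0 = pvRowTot I m i := by
          rw [hrs i, if_pos hi]
        have hb : (if st'.2.1.getD k 0 > 10 ∧ cs.getD k 0 - st'.2.1.getD k 0 > 10 ∧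
              st'.1.getD i 0 > 10 ∧ rs.getD i 0 - st'.1.getD i 0 > 10 then (1 : Int) else 0) =
            pvMaskCell I n m i k := by
          rw [e1, e2, e3, e4]
          unfold pvMaskCell
          rw [if_neg hv]
        by_cases hir : i = r ∧ r < n
        · obtain ⟨hirr, hrn⟩ := hir
          subst hirr
          rw [if_pos ⟨rfl, hrn⟩, pv_getD_set, h4 i, hM i c, hb]
          by_cases hck : k = c
          · subst hck
            split_ifs <;> omega
          · split_ifs <;> omega
        · rw [if_neg hir, hM r c]
          split_ifs <;> omega

theorem pv_loop2_outer (I : List (List Int)) (n m : Nat) (rs cs : List Int)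
    (hrs : ∀ r, rs.getD r 0 = if r < n then pvRowTot I m r else 0)
    (hcs : ∀ c, cs.getD c 0 = if c < m then pvColTot I n c else 0) :
    ∀ t ≤ n,
      pvInv I n m t 0 ((List.range t).foldl (fun st i => (List.range m).foldl (pvStep2 I rs cs i) st)
        (List.replicate n 0, List.replicate m 0, List.replicate n (List.replicate m 0))) := by
  intro t
  induction t with
  | zero =>
    intro _
    simp only [List.range_zero, List.foldl_nil]
    refine ⟨by simp, by simp, by simp, ?_, ?_, ?_, ?_⟩
    · intro r
      rw [pv_getD_replicate]
      split_ifs <;> simp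
    · intro r
      rw [pv_getD_replicate]
      split_ifs <;> (try (exfalso; omega)) <;> simp [pvLeft, pvOnes]
    · intro c
      rw [pv_getD_replicate]
      split_ifs <;> (try (exfalso; omega)) <;> simp [pvUp, pvOnes]
    · intro r c
      rw [pv_getD_replicate]
      split_ifs <;> (try (exfalso; omega)) <;> simp
  | succ t ih =>
    intro ht
    have htn : t < n := ht
    rw [List.range_succ, List.foldl_append]
    simp only [List.foldl_cons, List.foldl_nil]
    obtain ⟨g1, g2, g3, g4, gR, gC, gM⟩ :=
      pv_loop2_inner I n m rs cs hrs hcs t htn m le_rfl _ (ih (Nat.le_of_succ_le ht))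
    refine ⟨g1, g2, g3, g4, ?_, ?_, ?_⟩
    · intro r
      rw [gR r]
      by_cases hrt : r = t
      · subst hrt
        split_ifs <;> omega
      · by_cases hrt1 : r = t + 1
        · subst hrt1
          have h0 : pvLeft I (t + 1) 0 = 0 := by simp [pvLeft, pvOnes]
          split_ifs <;> omega
        · split_ifs <;> omega
    · intro c
      rw [gC c]
      split_ifs <;> omega
    · intro r c
      rw [gM r c]
      split_ifs <;> omega

theorem get_mask_eq_canon (I : List (List Int)) (h : ¬(I.length = 0 ∨ (I.headD []).length = 0)) :
    get_mask I = pvCanon I := by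
  simp only [get_mask]
  rw [if_neg h]
  obtain ⟨l1, l2, hrs, hcs⟩ := pv_loop1_main I I.length (I.headD []).length I.length le_rfl
  obtain ⟨g1, g2, g3, g4, gR, gC, gM⟩ :=
    pv_loop2_outer I I.length (I.headD []).length _ _ hrs (fun c => hcs c) I.length le_rfl
  unfold pvCanon
  refine congrArg some ?_
  apply List.ext_getElem
  · rw [g3]
    simp
  · intro r hr1 hr2
    have hrn : r < I.length := by rwa [g3] at hr1
    rw [← List.getD_eq_getElem _ [] hr1]
    have hrow : ((List.range I.length).map (fun i => (List.range (I.headD []).length).map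
        (fun j => pvMaskCell I I.length (I.headD []).length i j)))[r] =
        (List.range (I.headD []).length).map
          (fun j => pvMaskCell I I.length (I.headD []).length r j) := by
      simp [List.getElem_map, List.getElem_range]
    rw [hrow]
    apply List.ext_getElem
    · rw [g4 r, if_pos hrn]
      simp
    · intro c hc1 hc2
      have hcm : c < (I.headD []).length := by
        rw [g4 r, if_pos hrn] at hc1
        exact hc1
      rw [← List.getD_eq_getElem _ 0 hc1, gM r c, if_pos ⟨Or.inl hrn, hcm⟩]
      simp [List.getElem_map, List.getElem_range]

-- ---- B side ----
def pvScan (s : Int) : List Int → List Int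
  | [] => []
  | x :: t => (s + (if x ≠ 0 then 1 else 0)) :: pvScan (s + (if x ≠ 0 then 1 else 0)) t

theorem pv_foldl_scan (xs : List Int) :
    ∀ acc : List Int,
      xs.foldl (fun p x => p ++ [p.getLastD 0 + (if x ≠ 0 then 1 else 0)]) acc =
      acc ++ pvScan (acc.getLastD 0) xs := by
  induction xs with
  | nil => intro acc; simp [pvScan]
  | cons x t ih =>
    intro acc
    simp only [List.foldl_cons]
    rw [ih]
    simp [pvScan, List.append_assoc]

theorem pvScan_getD (xs : List Int) :
    ∀ (s : Int) (k : Nat), k < xs.length → (pvScan s xs).getD k 0 = s + pvOnes (xs.take (k + 1)) := by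
  induction xs with
  | nil => intro s k hk; simp at hk
  | cons x t ih =>
    intro s k hk
    cases k with
    | zero => simp [pvScan, pvOnes]
    | succ k =>
      have hk' : k < t.length := by simpa using hk
      simp only [pvScan, List.getD_cons_succ, List.take_succ_cons]
      rw [ih (s + (if x ≠ 0 then 1 else 0)) k hk']
      simp [pvOnes]
      ring

theorem pvPrefixOnes_getD (xs : List Int) (k : Nat) (h : k ≤ xs.length) :
    (pvPrefixOnes xs).getD k 0 = pvOnes (xs.take k) := by
  unfold pvPrefixOnes
  rw [pv_foldl_scan]
  cases k with
  | zero => simp [pvOnes]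
  | succ k =>
    have hk : k < xs.length := h
    simp only [List.singleton_append, List.getD_cons_succ]
    have h0 : ([(0 : Int)].getLastD 0) = 0 := rfl
    rw [h0, pvScan_getD xs 0 k hk]
    simp

theorem get_mask_alt_eq_canon (I : List (List Int)) (h : ¬(I.length = 0 ∨ (I.headD []).length = 0)) :
    get_mask_alt I = pvCanon I := by
  simp only [get_mask_alt]
  rw [if_neg h]
  unfold pvCanon
  refine congrArg some (List.map_congr_left ?_)
  intro i hi
  have hin : i < I.length := List.mem_range.mp hi
  refine List.map_congr_left ?_
  intro j hj
  have hjm : j < (I.headD []).length := List.mem_range.mp hj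
  have htake : ∀ (q k : Nat) (f : Nat → Int), k ≤ q →
      ((List.range q).map f).take k = (List.range k).map f := by
    intro q k f hkq
    rw [← List.map_take, List.take_range, Nat.min_eq_left hkq]
  simp only [pv_getD_map_range, hin, hjm, if_true]
  rw [pvPrefixOnes_getD _ i (by simpa using Nat.le_of_lt hin),
    pvPrefixOnes_getD _ j (by simpa using Nat.le_of_lt hjm),
    htake _ _ _ (Nat.le_of_lt hin), htake _ _ _ (Nat.le_of_lt hjm)]
  unfold pvMaskCell pvUp pvLeft pvColTot pvRowTot
  rfl

-- ===== VERDICT (by name: the statement is the Claim_ definition above) =====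
theorem get_mask_spec : Claim_equal_get_mask := by
  intro I _ hpre
  unfold Spec_get_mask
  have h : ¬(I.length = 0 ∨ (I.headD []).length = 0) := by
    rcases hpre with ⟨h1, h2, -⟩
    rintro (h0 | h0)
    · exact h1 (List.length_eq_zero_iff.mp h0)
    · exact h2 (List.length_eq_zero_iff.mp h0)
  rw [get_mask_eq_canon I h, get_mask_alt_eq_canon I h]
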